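-- pv_equiv track=rewrite | github.com/dmitry-mingazov/mgl-data-analysis | filters.py | split_chains_by_cid
-- ===== SOURCE A (Python) =====
-- def split_chains_by_cid(chains):
--     filtered_chains = []
--     for chain in chains:
--         cids = {}
--         for row in chain:
--             cid = row["cid"]
--             cid_chain = cids.get(cid, [])
--             cid_chain.append(row)
--             cids[cid] = cid_chain
--         for cid_chain in cids.values():
--             filtered_chains.append(cid_chain)
--     return filtered_chains
-- ===== SOURCE B (Python) =====
-- def split_chains_by_cid(chains):
--     result = []
--     for chain in chains:
--         order = dict.fromkeys(row["cid"] for row in chain)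
--         for cid in order:
--             result.append([row for row in chain if row["cid"] == cid])
--     return result
-- ===== Notes on version B (the rewrite author's own statement) =====
-- stated objective: alternative
-- what changed: Replaces the single-pass dict-of-lists accumulation with an index-first shape: per chain, first compute the ordered distinct cids (dict.fromkeys), then build each group by a separate filtering pass over the chain.
import Mathlib
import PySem

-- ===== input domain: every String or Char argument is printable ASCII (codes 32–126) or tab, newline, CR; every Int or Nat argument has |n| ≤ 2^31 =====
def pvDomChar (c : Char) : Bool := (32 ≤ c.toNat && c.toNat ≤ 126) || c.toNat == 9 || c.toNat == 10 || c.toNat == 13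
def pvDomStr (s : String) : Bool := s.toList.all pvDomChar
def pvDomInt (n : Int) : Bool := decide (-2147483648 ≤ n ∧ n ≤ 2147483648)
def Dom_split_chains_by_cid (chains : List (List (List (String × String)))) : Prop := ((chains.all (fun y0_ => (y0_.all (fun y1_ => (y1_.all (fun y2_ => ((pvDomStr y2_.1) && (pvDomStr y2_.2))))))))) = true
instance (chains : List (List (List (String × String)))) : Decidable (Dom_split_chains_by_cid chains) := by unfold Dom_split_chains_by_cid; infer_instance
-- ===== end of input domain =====

-- B replaces A's single-pass dict-of-lists accumulation by an index-first shape (ordered distinct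
-- cids, then one filtering pass per cid); same outputs, objective: alternative decomposition.

-- row["cid"]: first-match lookup in the row's association list; Pre_ guarantees the key is
-- present (Python raises KeyError otherwise), so the "" default is never used under Pre_.
def cidOf (row : List (String × String)) : String :=
  ((PySem.Dict.mk row).get? "cid").getD ""

-- ===== PORT A =====
def split_chains_by_cid (chains : List (List (List (String × String)))) : List (List (List (String × String))) :=
  chains.foldl (fun filtered_chains chain =>
    let cids : PySem.Dict String (List (List (String × String))) :=
      chain.foldl (fun cids row =>
        let cid := cidOf row
        let cid_chain := cids.getD cid []
        cids.insert cid (cid_chain ++ [row])) PySem.Dict.empty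
    cids.values.foldl (fun acc cid_chain => acc ++ [cid_chain]) filtered_chains) []

-- ===== PORT B =====
def split_chains_by_cid_alt (chains : List (List (List (String × String)))) : List (List (List (String × String))) :=
  chains.foldl (fun result chain =>
    let order := PySem.List.dedup (chain.map (fun row => cidOf row))
    order.foldl (fun acc cid => acc ++ [chain.filter (fun row => cidOf row == cid)]) result) []

-- ===== PRECONDITION & SPEC =====
-- Pre_ excludes exactly the inputs where some row lacks the key "cid": there Python A (and B) raise KeyError.
def Pre_split_chains_by_cid (chains : List (List (List (String × String)))) : Prop :=
  ∀ chain ∈ chains, ∀ row ∈ chain, "cid" ∈ row.map Prod.fst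
instance (chains : List (List (List (String × String)))) : Decidable (Pre_split_chains_by_cid chains) := by unfold Pre_split_chains_by_cid; infer_instance

def pvWitness_split_chains_by_cid : (List (List (List (String × String)))) :=
  [[[("cid", "a"), ("v", "1")], [("cid", "b"), ("v", "2")], [("cid", "a"), ("v", "3")]]]

def Spec_split_chains_by_cid (chains : List (List (List (String × String)))) (out : List (List (List (String × String)))) : Prop := out = split_chains_by_cid_alt chains
instance (chains : List (List (List (String × String)))) (out : List (List (List (String × String)))) : Decidable (Spec_split_chains_by_cid chains out) := by unfold Spec_split_chains_by_cid; infer_instance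

-- ===== CLAIM (what is proved, stated in full; the proofs are below) =====
def Claim_equal_split_chains_by_cid : Prop := ∀ (chains : List (List (List (String × String)))), Dom_split_chains_by_cid chains → Pre_split_chains_by_cid chains → Spec_split_chains_by_cid chains (split_chains_by_cid chains)

-- ===== LEMMAS AND PROOFS =====

-- A's per-chain grouping dict: its values are exactly B's per-chain groups.
lemma values_group (chain : List (List (String × String))) :
    (chain.foldl (fun cids row =>
        cids.insert (cidOf row) (cids.getD (cidOf row) [] ++ [row]))
      (PySem.Dict.empty : PySem.Dict String (List (List (String × String))))).values
    = (PySem.List.dedup (chain.map (fun row => cidOf row))).map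
        (fun cid => chain.filter (fun row => cidOf row == cid)) := by
  have hmod :
      (fun (cids : PySem.Dict String (List (List (String × String)))) row =>
        cids.insert (cidOf row) (cids.getD (cidOf row) [] ++ [row]))
      = (fun cids row => cids.modify (cidOf row) [] (· ++ [row])) := rfl
  rw [hmod]
  have hnd : (chain.foldl (fun cids row => cids.modify (cidOf row) [] (· ++ [row]))
      (PySem.Dict.empty : PySem.Dict String (List (List (String × String))))).keys.Nodup :=
    PySem.Dict.nodup_keys_foldl_modify_key chain cidOf [] (fun _ row v => v ++ [row]) _
      (by simp [pysem])
  rw [PySem.Dict.values_eq_map_keys _ hnd []]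
  have hkeys : (chain.foldl (fun cids row => cids.modify (cidOf row) [] (· ++ [row]))
      (PySem.Dict.empty : PySem.Dict String (List (List (String × String))))).keys
      = PySem.List.dedup (chain.map (fun row => cidOf row)) := by
    rw [PySem.Dict.keys_foldl_modify_key chain cidOf [] (fun _ row v => v ++ [row])]
    simp only [PySem.Set.update, PySem.Dict.keys_empty, PySem.List.dedup_eq_ofList,
      PySem.Set.ofList_eq_foldl, List.foldl_map]
  rw [hkeys]
  apply List.map_congr_left
  intro c _
  have hfold : chain.foldl (fun cids row => cids.modify (cidOf row) [] (· ++ [row]))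
      (PySem.Dict.empty : PySem.Dict String (List (List (String × String))))
      = (chain.map (fun row => (cidOf row, row))).foldl
          (fun cids p => cids.modify p.1 [] (· ++ [p.2])) PySem.Dict.empty := by
    rw [List.foldl_map]
  rw [hfold, PySem.Dict.getD_foldl_modify_append]
  simp [List.filter_map, Function.comp_def]

-- ===== VERDICT (by name: the statement is the Claim_ definition above) =====
theorem split_chains_by_cid_spec : Claim_equal_split_chains_by_cid := by
  intro chains _ _
  unfold Spec_split_chains_by_cid split_chains_by_cid split_chains_by_cid_alt
  apply List.foldl_ext
  intro acc chain _
  simp only [PySem.List.foldl_append_singleton, PySem.List.foldl_append_singleton_eq_map,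
    values_group]
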